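-- pv_equiv track=rewrite | github.com/kwyjad/Pythia | scripts/ci/make_ai_summary.py | _extract_pytest_failure_names
-- ===== SOURCE A (Python) =====
-- from typing import Dict, List
--
-- def _extract_pytest_failure_names(texts: List[str], limit: int = 5) -> List[str]:
--     candidates: List[str] = []
--     seen = set()
--     for text in texts:
--         for line in text.splitlines():
--             stripped = line.strip()
--             if not stripped.startswith("FAILED "):
--                 continue
--             remainder = stripped[len("FAILED "):]
--             name = remainder.split(" - ", 1)[0].strip()
--             if not name or name in seen:
--                 continue
--             candidates.append(name)
--             seen.add(name)
--             if len(candidates) >= limit: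
--                 return candidates
--     return candidates
-- ===== SOURCE B (Python) =====
-- def _iter_failure_names(texts):
--     """Yield every (possibly repeated) failure name announced by a 'FAILED ' line."""
--     for text in texts:
--         for line in text.splitlines():
--             stripped = line.strip()
--             if stripped.startswith("FAILED "):
--                 name = stripped[len("FAILED "):].split(" - ", 1)[0].strip()
--                 if name:
--                     yield name
--
-- def _extract_pytest_failure_names(texts, limit=5):
--     if limit <= 0:
--         return []
--     return list(dict.fromkeys(_iter_failure_names(texts)))[:limit]
-- ===== Notes on version B (the rewrite author's own statement) =====
-- stated objective: idiomatic
-- what changed: B replaces A's fused nested loop with mid-loop set bookkeeping and early return by a generator of all candidate names fed to dict.fromkeys for ordered dedup, then a slice [:limit]; a limit<=0 guard returns [].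
-- intended difference: On inputs with limit <= 0 that contain a line which (after left-stripping) starts with 'FAILED ', A can still return a one-element list with the first extracted name because its limit check only runs after an append, while B returns [], the intended result when at most limit <= 0 names are requested. — e.g. on _extract_pytest_failure_names(["FAILED a"], 0): A returns ["a"], B returns []
import Mathlib
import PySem

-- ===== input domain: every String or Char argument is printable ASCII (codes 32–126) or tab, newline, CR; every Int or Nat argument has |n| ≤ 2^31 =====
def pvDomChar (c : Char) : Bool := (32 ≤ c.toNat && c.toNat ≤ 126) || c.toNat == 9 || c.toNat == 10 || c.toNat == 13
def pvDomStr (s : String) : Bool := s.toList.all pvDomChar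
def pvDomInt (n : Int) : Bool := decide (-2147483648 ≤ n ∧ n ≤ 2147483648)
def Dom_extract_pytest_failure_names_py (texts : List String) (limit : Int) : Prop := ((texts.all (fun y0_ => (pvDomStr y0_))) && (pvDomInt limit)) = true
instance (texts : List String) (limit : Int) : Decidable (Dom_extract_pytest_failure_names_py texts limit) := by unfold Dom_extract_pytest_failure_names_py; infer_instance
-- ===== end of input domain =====

-- B = dict.fromkeys ordered dedup of all candidate names, sliced to limit, with a limit ≤ 0 guard
-- (objective: idiomatic; same cost); A fuses extraction, set dedup and an early return in one nested loop.
-- A and B differ exactly on limit ≤ 0 with a candidate line present (see D_ below); equal everywhere else.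

-- ===== PORT A =====
-- the body of A's inner loop up to the 'not name' test: strip the line, check the
-- 'FAILED ' prefix, take the part before ' - ', strip it, drop it if empty
def pvParseLine (line : String) : Option String :=
  let stripped := PySem.Str.strip line
  if PySem.Str.startswith stripped "FAILED " = false then none
  else
    let remainder := PySem.Str.slice stripped (some 7) none
    let name := PySem.Str.strip (((PySem.Str.splitMax? remainder " - " 1).getD []).headD "")
    if name = "" then none else some name

-- fused nested loop with early return, modelled as Sum (continue-state ⊕ returned-value)
def pvA_inner (limit : Int) : List String → List String → PySem.Set String → Sum (List String × PySem.Set String) (List String)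
  | [], cands, seen => .inl (cands, seen)
  | line :: rest, cands, seen =>
    match pvParseLine line with
    | none => pvA_inner limit rest cands seen
    | some name =>
      if PySem.Set.contains seen name then pvA_inner limit rest cands seen
      else
        let cands' := cands ++ [name]
        let seen' := PySem.Set.add seen name
        if limit ≤ (cands'.length : Int) then .inr cands'
        else pvA_inner limit rest cands' seen'

def pvA_outer (limit : Int) : List String → List String → PySem.Set String → List String
  | [], cands, _ => cands
  | t :: ts, cands, seen =>
    match pvA_inner limit (PySem.Str.splitlines t) cands seen with
    | .inr r => r
    | .inl (c, s) => pvA_outer limit ts c s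

def extract_pytest_failure_names_py (texts : List String) (limit : Int) : List String :=
  pvA_outer limit texts [] PySem.Set.empty

-- ===== PORT B =====
-- the generator _iter_failure_names: every candidate name of a stripped line, in order, no dedup
def pvB_parse (ln : String) : Option String :=
  if PySem.Str.startswith ln "FAILED " then
    let name := PySem.Str.strip (((PySem.Str.splitMax? (PySem.Str.slice ln (some 7) none) " - " 1).getD []).headD "")
    if name = "" then none else some name
  else none

def pvB_candidates (texts : List String) : List String :=
  texts.flatMap (fun t => ((PySem.Str.splitlines t).map PySem.Str.strip).filterMap pvB_parse)

-- list(dict.fromkeys(...))[:limit] with the limit ≤ 0 guard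
def extract_pytest_failure_names_py_alt (texts : List String) (limit : Int) : List String :=
  if limit ≤ 0 then []
  else PySem.List.slice (PySem.List.dedup (pvB_candidates texts)) none (some limit)

-- ===== PRECONDITION & SPEC =====
-- On inputs with limit ≤ 0 that contain a 'FAILED ' line naming a failure, A returns a
-- one-element list with the first extracted name (its limit check only runs after an append),
-- while B returns [], the intended result when at most limit ≤ 0 names are requested.
def D_extract_pytest_failure_names_py (texts : List String) (limit : Int) : Prop :=
  limit ≤ 0 ∧ texts.any (fun t => (PySem.Str.splitlines t).any (fun l => (pvParseLine l).isSome)) = true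
instance (texts : List String) (limit : Int) : Decidable (D_extract_pytest_failure_names_py texts limit) := by unfold D_extract_pytest_failure_names_py; infer_instance

def Spec_extract_pytest_failure_names_py (texts : List String) (limit : Int) (out : List String) : Prop := ¬ D_extract_pytest_failure_names_py texts limit → out = extract_pytest_failure_names_py_alt texts limit
instance (texts : List String) (limit : Int) (out : List String) : Decidable (Spec_extract_pytest_failure_names_py texts limit out) := by unfold Spec_extract_pytest_failure_names_py; infer_instance

def pvDiffWitness_extract_pytest_failure_names_py : List String × Int := (["FAILED a"], 0)
def pvDiffWitnessOut_extract_pytest_failure_names_py : (List String) × (List String) := (["a"], [])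

-- ===== CLAIM (what is proved, stated in full; the proofs are below) =====
def Claim_unchanged_extract_pytest_failure_names_py : Prop := ∀ (texts : List String) (limit : Int), Dom_extract_pytest_failure_names_py texts limit → Spec_extract_pytest_failure_names_py texts limit (extract_pytest_failure_names_py texts limit)
def Claim_changed_extract_pytest_failure_names_py : Prop := Dom_extract_pytest_failure_names_py (pvDiffWitness_extract_pytest_failure_names_py.1) (pvDiffWitness_extract_pytest_failure_names_py.2) ∧ D_extract_pytest_failure_names_py (pvDiffWitness_extract_pytest_failure_names_py.1) (pvDiffWitness_extract_pytest_failure_names_py.2) ∧ extract_pytest_failure_names_py (pvDiffWitness_extract_pytest_failure_names_py.1) (pvDiffWitness_extract_pytest_failure_names_py.2) = pvDiffWitnessOut_extract_pytest_failure_names_py.1 ∧ extract_pytest_failure_names_py_alt (pvDiffWitness_extract_pytest_failure_names_py.1) (pvDiffWitness_extract_pytest_failure_names_py.2) = pvDiffWitnessOut_extract_pytest_failure_names_py.2 ∧ pvDiffWitnessOut_extract_pytest_failure_names_py.1 ≠ pvDiffWitnessOut_extract_pytest_failure_names_py.2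
def Claim_exact_extract_pytest_failure_names_py : Prop := ∀ (texts : List String) (limit : Int), Dom_extract_pytest_failure_names_py texts limit → D_extract_pytest_failure_names_py texts limit → extract_pytest_failure_names_py texts limit ≠ extract_pytest_failure_names_py_alt texts limit

-- ===== LEMMAS AND PROOFS =====

-- A's parse of a raw line is B's parse of the stripped line
theorem pvParse_eq (line : String) : pvParseLine line = pvB_parse (PySem.Str.strip line) := by
  unfold pvParseLine pvB_parse
  by_cases hsw : PySem.Str.startswith (PySem.Str.strip line) "FAILED " = true
  · rw [if_neg (by rw [hsw]; simp), if_pos hsw]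
  · rw [if_pos (by simpa using hsw), if_neg hsw]

-- proof-side abstraction: A's per-name bookkeeping, run directly on a candidate list
def pvFuse (limit : Int) : List String → List String → PySem.Set String → Sum (List String × PySem.Set String) (List String)
  | [], cands, seen => .inl (cands, seen)
  | n :: rest, cands, seen =>
    if PySem.Set.contains seen n then pvFuse limit rest cands seen
    else if limit ≤ ((cands ++ [n]).length : Int) then .inr (cands ++ [n])
    else pvFuse limit rest (cands ++ [n]) (PySem.Set.add seen n)

-- dedup of ns relative to an already-seen set (only the new elements, first occurrences)
def pvDedupFrom (seen : PySem.Set String) : List String → List String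
  | [] => []
  | n :: rest =>
    if PySem.Set.contains seen n then pvDedupFrom seen rest
    else n :: pvDedupFrom (PySem.Set.add seen n) rest

theorem pvA_inner_eq_fuse (limit : Int) (lines : List String) (cands : List String) (seen : PySem.Set String) :
    pvA_inner limit lines cands seen = pvFuse limit ((lines.map PySem.Str.strip).filterMap pvB_parse) cands seen := by
  induction lines generalizing cands seen with
  | nil => rfl
  | cons line rest ih =>
    rw [List.map_cons]
    cases hp : pvParseLine line with
    | none =>
      have hp' : pvB_parse (PySem.Str.strip line) = none := by rw [← pvParse_eq]; exact hp
      rw [List.filterMap_cons_none hp']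
      simp only [pvA_inner, hp]
      exact ih cands seen
    | some name =>
      have hp' : pvB_parse (PySem.Str.strip line) = some name := by rw [← pvParse_eq]; exact hp
      rw [List.filterMap_cons_some hp']
      simp only [pvA_inner, hp]
      rw [pvFuse]
      by_cases hmem : PySem.Set.contains seen name = true
      · rw [if_pos hmem, if_pos hmem]
        exact ih cands seen
      · rw [if_neg hmem, if_neg hmem]
        by_cases hl : limit ≤ ((cands ++ [name]).length : Int)
        · rw [if_pos hl, if_pos hl]
        · rw [if_neg hl, if_neg hl]
          exact ih _ _

theorem pvFuse_append (limit : Int) (xs ys : List String) (cands : List String) (seen : PySem.Set String) :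
    pvFuse limit (xs ++ ys) cands seen =
      match pvFuse limit xs cands seen with
      | .inr r => .inr r
      | .inl (c, s) => pvFuse limit ys c s := by
  induction xs generalizing cands seen with
  | nil => rfl
  | cons n rest ih =>
    simp only [List.cons_append, pvFuse]
    by_cases hmem : n ∈ seen
    · simp [hmem, ih]
    · by_cases hl : limit ≤ (cands.length : Int) + 1
      · simp [hmem, hl]
      · simp [hmem, hl, ih]

theorem pvA_outer_eq_fuse (limit : Int) (ts : List String) (cands : List String) (seen : PySem.Set String) :
    pvA_outer limit ts cands seen =
      (match pvFuse limit (pvB_candidates ts) cands seen with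
       | .inl (c, _) => c
       | .inr r => r) := by
  induction ts generalizing cands seen with
  | nil => rfl
  | cons t rest ih =>
    simp only [pvA_outer, pvB_candidates, List.flatMap_cons, pvFuse_append, pvA_inner_eq_fuse]
    cases h : pvFuse limit (((PySem.Str.splitlines t).map PySem.Str.strip).filterMap pvB_parse) cands seen with
    | inl cs =>
      cases cs with
      | mk c s =>
        show pvA_outer limit rest c s =
          (match pvFuse limit (rest.flatMap (fun t => ((PySem.Str.splitlines t).map PySem.Str.strip).filterMap pvB_parse)) c s with
           | .inl (c, _) => c
           | .inr r => r)
        exact ih c s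
    | inr r => simp

-- A's fused loop is: append the new part of the dedup, truncated to the remaining budget
theorem pvFuse_out_eq (limit : Int) (ns : List String) (res : List String) (seen : PySem.Set String)
    (h : 1 ≤ limit - (res.length : Int)) :
    (match pvFuse limit ns res seen with
     | .inl (c, _) => c
     | .inr r => r) = res ++ (pvDedupFrom seen ns).take (limit - (res.length : Int)).toNat := by
  induction ns generalizing res seen with
  | nil => simp [pvFuse, pvDedupFrom]
  | cons n rest ih =>
    rw [pvFuse, pvDedupFrom]
    by_cases hmem : PySem.Set.contains seen n = true
    · rw [if_pos hmem, if_pos hmem]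
      exact ih res seen h
    · rw [if_neg hmem, if_neg hmem]
      by_cases hl : limit ≤ ((res ++ [n]).length : Int)
      · rw [if_pos hl]
        have hl' : limit ≤ (res.length : Int) + 1 := by simpa using hl
        have h1 : (limit - (res.length : Int)).toNat = 1 := by omega
        show res ++ [n] = res ++ (n :: pvDedupFrom (PySem.Set.add seen n) rest).take (limit - (res.length : Int)).toNat
        rw [h1, List.take_succ_cons, List.take_zero]
      · rw [if_neg hl]
        have hl' : ¬ limit ≤ (res.length : Int) + 1 := by simpa using hl
        have h2 : 1 ≤ limit - (((res ++ [n]).length : Nat) : Int) := by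
          simp only [List.length_append, List.length_cons, List.length_nil]
          push_cast
          omega
        rw [ih (res ++ [n]) (PySem.Set.add seen n) h2]
        have h3 : (limit - (res.length : Int)).toNat = ((limit - (((res ++ [n]).length : Nat) : Int)).toNat) + 1 := by
          simp only [List.length_append, List.length_cons, List.length_nil]
          push_cast
          omega
        rw [h3, List.take_succ_cons, List.append_assoc, List.singleton_append]

-- dict.fromkeys dedup = pvDedupFrom from an empty seen set
theorem pvFoldl_add_eq (ns : List String) (seen : PySem.Set String) :
    ns.foldl PySem.Set.add seen = seen ++ pvDedupFrom seen ns := by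
  induction ns generalizing seen with
  | nil => simp [pvDedupFrom]
  | cons n rest ih =>
    rw [List.foldl_cons, pvDedupFrom]
    by_cases hmem : PySem.Set.contains seen n = true
    · rw [if_pos hmem]
      have hset : PySem.Set.add seen n = seen := by
        unfold PySem.Set.add
        rw [if_pos hmem]
      rw [hset, ih]
    · rw [if_neg hmem]
      have hadd : PySem.Set.add seen n = seen ++ [n] := by
        unfold PySem.Set.add
        rw [if_neg hmem]
      rw [hadd, ih]
      simp

theorem pvDedup_eq (ns : List String) : PySem.List.dedup ns = pvDedupFrom PySem.Set.empty ns := by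
  have := pvFoldl_add_eq ns PySem.Set.empty
  simpa [PySem.List.dedup_eq_ofList, PySem.Set.ofList_eq_foldl, PySem.Set.empty] using this

-- if no line parses to a name, there are no candidates at all
theorem pvNoMark_imp_no_cand (texts : List String)
    (hno : texts.any (fun t => (PySem.Str.splitlines t).any (fun l => (pvParseLine l).isSome)) = false) :
    pvB_candidates texts = [] := by
  rw [List.any_eq_false] at hno
  unfold pvB_candidates
  rw [List.flatMap_eq_nil_iff]
  intro t ht
  rw [List.filterMap_eq_nil_iff]
  intro x hx
  rw [List.mem_map] at hx
  obtain ⟨l, hlmem, rfl⟩ := hx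
  by_contra hne
  have hsome : (pvParseLine l).isSome = true := by
    rw [pvParse_eq]
    cases hp : pvB_parse (PySem.Str.strip l) with
    | none => exact absurd hp hne
    | some v => rfl
  exact hno t ht (List.any_eq_true.mpr ⟨l, hlmem, hsome⟩)

-- a line that parses to a name contributes a candidate
theorem pvCand_ne_nil_of_mark (texts : List String)
    (h : texts.any (fun t => (PySem.Str.splitlines t).any (fun l => (pvParseLine l).isSome)) = true) :
    pvB_candidates texts ≠ [] := by
  rw [List.any_eq_true] at h
  obtain ⟨t, ht, hline⟩ := h
  rw [List.any_eq_true] at hline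
  obtain ⟨l, hlmem, hmark⟩ := hline
  rw [pvParse_eq] at hmark
  obtain ⟨name, hname⟩ := Option.isSome_iff_exists.mp hmark
  apply List.ne_nil_of_mem (a := name)
  unfold pvB_candidates
  rw [List.mem_flatMap]
  exact ⟨t, ht, List.mem_filterMap.mpr ⟨PySem.Str.strip l, List.mem_map.mpr ⟨l, hlmem, rfl⟩, hname⟩⟩

-- ===== VERDICT (by name: the statement is the Claim_ definition above) =====
theorem extract_pytest_failure_names_py_spec : Claim_unchanged_extract_pytest_failure_names_py := by
  intro texts limit _ hnD
  unfold extract_pytest_failure_names_py extract_pytest_failure_names_py_alt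
  rw [pvA_outer_eq_fuse]
  by_cases hl : limit ≤ 0
  · rw [if_pos hl]
    have hno : texts.any (fun t => (PySem.Str.splitlines t).any (fun l => (pvParseLine l).isSome)) = false := by
      by_contra hne
      exact hnD ⟨hl, by simpa [Option.isSome_iff_ne_none] using hne⟩
    rw [pvNoMark_imp_no_cand texts hno]
    rfl
  · rw [if_neg hl]
    rw [pvFuse_out_eq limit (pvB_candidates texts) [] PySem.Set.empty (by simp; omega)]
    have hslice : PySem.List.slice (PySem.List.dedup (pvB_candidates texts)) none (some limit) =
        (PySem.List.dedup (pvB_candidates texts)).take limit.toNat := by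
      have hcast : limit = ((limit.toNat : Nat) : Int) := by omega
      rw [hcast, PySem.List.slice_to_natCast]
      simp
      omega
    rw [hslice, pvDedup_eq]
    simp

theorem extract_pytest_failure_names_py_changed : Claim_changed_extract_pytest_failure_names_py := by
  unfold Claim_changed_extract_pytest_failure_names_py; decide

theorem extract_pytest_failure_names_py_tight : Claim_exact_extract_pytest_failure_names_py := by
  intro texts limit _ hD
  obtain ⟨hl, hmark⟩ := hD
  unfold extract_pytest_failure_names_py extract_pytest_failure_names_py_alt
  rw [pvA_outer_eq_fuse, if_pos hl]
  have hne : pvB_candidates texts ≠ [] := pvCand_ne_nil_of_mark texts hmark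
  obtain ⟨c, rest, hcr⟩ := List.exists_cons_of_ne_nil hne
  rw [hcr, pvFuse]
  rw [if_neg (by simp [PySem.Set.contains, PySem.Set.empty]), if_pos (by simp; omega)]
  simp
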